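-- pv_equiv track=rewrite | github.com/trinit-ai/WORLD13 | engine/watcher.py | _split_boolean
-- ===== SOURCE A (Python) =====
-- def _split_boolean(condition: str, operator: str) -> list[str]:
--     """Split condition on boolean operator, respecting quoted strings."""
--     parts = []
--     current = ""
--     in_quote = False
--     quote_char = ""
--     i = 0
--     while i < len(condition):
--         c = condition[i]
--         if c in ('"', "'") and not in_quote:
--             in_quote = True
--             quote_char = c
--             current += c
--         elif c == quote_char and in_quote:
--             in_quote = False
--             current += c
--         elif not in_quote and condition[i:i + len(operator)].lower() == operator:
--             parts.append(current.strip())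
--             current = ""
--             i += len(operator)
--             continue
--         else:
--             current += c
--         i += 1
--     if current.strip():
--         parts.append(current.strip())
--     return parts
-- ===== SOURCE B (Python) =====
-- def _split_boolean(condition: str, operator: str) -> list[str]:
--     """Split condition on boolean operator, respecting quoted strings."""
--     # pass 1: record the start index of every operator match outside quotes
--     starts = []
--     in_quote = False
--     quote_char = ""
--     n = len(condition)
--     L = len(operator)
--     i = 0
--     while i < n:
--         c = condition[i]
--         if c in ('"', "'") and not in_quote:
--             in_quote = True
--             quote_char = c
--             i += 1
--         elif c == quote_char and in_quote:
--             in_quote = False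
--             i += 1
--         elif not in_quote and condition[i:i + L].lower() == operator:
--             starts.append(i)
--             i += L
--         else:
--             i += 1
--     # pass 2: slice out the segments between consecutive boundaries
--     parts = []
--     prev = 0
--     for m in starts:
--         parts.append(condition[prev:m].strip())
--         prev = m + L
--     tail = condition[prev:].strip()
--     if tail:
--         parts.append(tail)
--     return parts
-- ===== Notes on version B (the rewrite author's own statement) =====
-- stated objective: alternative
-- what changed: B is a two-pass splitter: one scan records only the quote state and the start indices of out-of-quote operator matches, then a second pass slices the segments out of the original string at those boundaries, instead of A's single loop that accumulates the current segment character by character.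
-- outside the precondition, e.g. on _split_boolean("'a'", ''): A returns ["'a'"], B returns ["'a'"]
import Mathlib
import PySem

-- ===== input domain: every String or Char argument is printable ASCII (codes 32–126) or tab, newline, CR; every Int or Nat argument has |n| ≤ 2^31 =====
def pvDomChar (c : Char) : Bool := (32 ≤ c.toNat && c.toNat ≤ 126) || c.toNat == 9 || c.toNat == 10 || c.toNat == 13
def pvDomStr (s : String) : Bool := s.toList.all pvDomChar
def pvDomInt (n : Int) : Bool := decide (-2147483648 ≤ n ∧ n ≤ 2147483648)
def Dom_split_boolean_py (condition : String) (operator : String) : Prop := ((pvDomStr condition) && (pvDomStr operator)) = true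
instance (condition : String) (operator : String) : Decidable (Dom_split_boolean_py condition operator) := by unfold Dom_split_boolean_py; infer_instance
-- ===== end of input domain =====

-- B restructures A's single accumulate-as-you-go loop into two passes (record match indices, then
-- slice); equivalence proven for every non-empty operator (objective: alternative, not faster).

-- ===== PORT A =====
-- A's while loop: fuel bounds the iterations (Python diverges when operator = "", which Pre_ excludes;
-- with operator ≠ "" fuel = |condition| + 1 is never exhausted). State: remaining chars, current, in_quote, quote_char.
def pvLoopA (op : List Char) : Nat → List Char → List Char → Bool → Char → List (List Char)
  | 0, _, _, _, _ => []
  | _ + 1, [], cur, _, _ =>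
      -- end of the while loop: `if current.strip(): parts.append(current.strip())`
      if PySem.Chars.strip cur = [] then [] else [PySem.Chars.strip cur]
  | fuel + 1, c :: rs, cur, inq, qc =>
      if (c = '"' ∨ c = '\'') ∧ inq = false then
        pvLoopA op fuel rs (cur ++ [c]) true c
      else if c = qc ∧ inq = true then
        pvLoopA op fuel rs (cur ++ [c]) false qc
      else if inq = false ∧ PySem.Chars.lower ((c :: rs).take op.length) = op then
        PySem.Chars.strip cur :: pvLoopA op fuel ((c :: rs).drop op.length) [] inq qc
      else
        pvLoopA op fuel rs (cur ++ [c]) inq qc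

def split_boolean_py (condition : String) (operator : String) : List String :=
  (pvLoopA operator.toList (condition.toList.length + 1) condition.toList [] false ' ').map String.mk

-- ===== PORT B =====
-- B pass 1: scan tracking only the quote state, recording the absolute start index of every
-- out-of-quote operator match (same fuel discipline as A's loop).
def pvMatchesB (op : List Char) : Nat → List Char → Nat → Bool → Char → List Nat
  | 0, _, _, _, _ => []
  | _ + 1, [], _, _, _ => []
  | fuel + 1, c :: rs, i, inq, qc =>
      if (c = '"' ∨ c = '\'') ∧ inq = false then
        pvMatchesB op fuel rs (i + 1) true c
      else if c = qc ∧ inq = true then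
        pvMatchesB op fuel rs (i + 1) false qc
      else if inq = false ∧ PySem.Chars.lower ((c :: rs).take op.length) = op then
        i :: pvMatchesB op fuel ((c :: rs).drop op.length) (i + op.length) inq qc
      else
        pvMatchesB op fuel rs (i + 1) inq qc

-- B pass 2: slice out each segment condition[prev:m] (appended unconditionally), then the tail
-- condition[prev:] only if non-empty after strip.
def pvAssembleB (s : List Char) (L : Nat) : Nat → List Nat → List (List Char)
  | prev, [] =>
      if PySem.Chars.strip (s.drop prev) = [] then [] else [PySem.Chars.strip (s.drop prev)]
  | prev, m :: ms =>
      PySem.Chars.strip ((s.drop prev).take (m - prev)) :: pvAssembleB s L (m + L) ms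

def split_boolean_py_alt (condition : String) (operator : String) : List String :=
  (pvAssembleB condition.toList operator.toList.length 0
      (pvMatchesB operator.toList (condition.toList.length + 1) condition.toList 0 false ' ')).map String.mk

-- ===== PRECONDITION & SPEC =====
-- Pre_ excludes operator = "": there Python A's loop never advances (i += 0) and diverges as soon as
-- it reaches any position outside a quote; A returns only on degenerate empty/fully-quoted conditions.
def Pre_split_boolean_py (condition : String) (operator : String) : Prop := operator ≠ ""
instance (condition : String) (operator : String) : Decidable (Pre_split_boolean_py condition operator) := by unfold Pre_split_boolean_py; infer_instance

def pvWitness_split_boolean_py : String × String := ("a and 'b and c'", "and")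

def Spec_split_boolean_py (condition : String) (operator : String) (out : List String) : Prop := out = split_boolean_py_alt condition operator
instance (condition : String) (operator : String) (out : List String) : Decidable (Spec_split_boolean_py condition operator out) := by unfold Spec_split_boolean_py; infer_instance

-- ===== CLAIM (what is proved, stated in full; the proofs are below) =====
def Claim_equal_split_boolean_py : Prop := ∀ (condition : String) (operator : String), Dom_split_boolean_py condition operator → Pre_split_boolean_py condition operator → Spec_split_boolean_py condition operator (split_boolean_py condition operator)

-- ===== LEMMAS AND PROOFS =====

-- Invariant: A's accumulator `cur` together with the remaining input `rest` is exactly the suffix of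
-- the full string starting at the segment start p, and the scan position is p + |cur|.
theorem pvLoopA_eq_assemble (op : List Char) (hop : op ≠ []) (s : List Char) :
    ∀ (fuel : Nat) (rest cur : List Char) (inq : Bool) (qc : Char) (p : Nat),
      rest.length < fuel → cur ++ rest = s.drop p →
      pvLoopA op fuel rest cur inq qc =
        pvAssembleB s op.length p (pvMatchesB op fuel rest (p + cur.length) inq qc) := by
  intro fuel
  induction fuel with
  | zero => intro rest cur inq qc p h _; omega
  | succ fuel ih =>
    intro rest cur inq qc p hlen hsplit
    cases rest with
    | nil =>
      simp only [pvLoopA, pvMatchesB, pvAssembleB]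
      have : cur = s.drop p := by simpa using hsplit
      rw [← this]
    | cons c rs =>
      have hrs : rs.length < fuel := by simpa using hlen
      have hL : 1 ≤ op.length := by
        cases op with
        | nil => exact absurd rfl hop
        | cons _ _ => simp
      simp only [pvLoopA, pvMatchesB]
      split_ifs with h1 h2 h3
      · -- open quote
        rw [ih rs (cur ++ [c]) true c p hrs (by simpa using hsplit)]
        simp [Nat.add_assoc]
      · -- close quote
        rw [ih rs (cur ++ [c]) false qc p hrs (by simpa using hsplit)]
        simp [Nat.add_assoc]
      · -- operator match: segment boundary
        have hdrop : s.drop (p + cur.length) = c :: rs := by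
          have h := congrArg (List.drop cur.length) hsplit
          simpa [List.drop_drop, Nat.add_comm, Nat.add_left_comm, Nat.add_assoc] using h.symm
        have htake : (s.drop p).take cur.length = cur := by
          rw [← hsplit, List.take_left]
        have hdropL : (c :: rs).drop op.length = s.drop (p + cur.length + op.length) := by
          have h := congrArg (List.drop op.length) hdrop
          simpa [List.drop_drop, Nat.add_comm, Nat.add_left_comm, Nat.add_assoc] using h.symm
        have hlen' : ((c :: rs).drop op.length).length < fuel := by
          simp only [List.length_drop, List.length_cons]
          omega
        rw [ih ((c :: rs).drop op.length) [] inq qc (p + cur.length + op.length) hlen'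
              (by simpa using hdropL.symm ▸ (rfl : ([] : List Char) ++ (c :: rs).drop op.length = (c :: rs).drop op.length))]
        simp [pvAssembleB, htake, Nat.add_assoc]
      · -- ordinary char
        rw [ih rs (cur ++ [c]) inq qc p hrs (by simpa using hsplit)]
        simp [Nat.add_assoc]

-- ===== VERDICT (by name: the statement is the Claim_ definition above) =====
theorem split_boolean_py_spec : Claim_equal_split_boolean_py := by
  intro condition operator _ hpre
  unfold Spec_split_boolean_py split_boolean_py split_boolean_py_alt
  have hop : operator.toList ≠ [] := by
    intro h
    apply hpre
    have : operator.toList = ("" : String).toList := by simpa using h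
    exact String.toList_injective this
  rw [pvLoopA_eq_assemble operator.toList hop condition.toList (condition.toList.length + 1)
        condition.toList [] false ' ' 0 (by omega) (by simp)]
  simp
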